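-- pv_equiv track=rewrite | github.com/babubej/Python | edge.py | DataParsing
-- ===== SOURCE A (Python) =====
-- def DataParsing(rawdata,slave_id):
--     #"triggerDate","disTemperature2","disPressure2","sumpPressure2","generalStatus","faultStatus","vfdCurrentSpeedPercent2"
--     results = []
--     data_file=[]
--     for x in rawdata:
--         for line in x:
--             words = line.split('|')
--             #get each item in one line
--             first = words[0].split(',')
--             date = first[0]
--             words[0]= words[0].replace(date+',','')
--             result =[]
--             for i in words:
--                 split_data = i.split(',')
--                 split_data.insert(0,date)
--                 result.append(split_data)
--             results.append(result)
--     for y in results: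
--         for t in y:
--             if(t[1]==slave_id):
--                 data_file.append(t)
--     return data_file
-- ===== SOURCE B (Python) =====
-- def DataParsing(rawdata, slave_id):
--     # A word's first comma-field equals slave_id iff slave_id is comma-free and
--     # the word is slave_id itself or starts with slave_id + ','  — so filter by a
--     # string prefix test and only split the (few) matching words into rows.
--     if ',' in slave_id:
--         return []
--     key = slave_id + ','
--     data_file = []
--     for x in rawdata:
--         for line in x:
--             words = line.split('|')
--             date = words[0].split(',')[0]
--             words[0] = words[0].replace(date + ',', '')
--             for w in words:
--                 if w == slave_id or w.startswith(key):
--                     data_file.append([date] + w.split(','))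
--     return data_file
-- ===== Notes on version B (the rewrite author's own statement) =====
-- stated objective: simpler
-- what changed: B drops A's intermediate nested `results` list and its second scan entirely and selects words by a string prefix test (w == slave_id or w.startswith(slave_id+',')), splitting only the selected words into rows; an id containing ',' can never equal a split field, so B returns [] for it immediately.
import Mathlib
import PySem

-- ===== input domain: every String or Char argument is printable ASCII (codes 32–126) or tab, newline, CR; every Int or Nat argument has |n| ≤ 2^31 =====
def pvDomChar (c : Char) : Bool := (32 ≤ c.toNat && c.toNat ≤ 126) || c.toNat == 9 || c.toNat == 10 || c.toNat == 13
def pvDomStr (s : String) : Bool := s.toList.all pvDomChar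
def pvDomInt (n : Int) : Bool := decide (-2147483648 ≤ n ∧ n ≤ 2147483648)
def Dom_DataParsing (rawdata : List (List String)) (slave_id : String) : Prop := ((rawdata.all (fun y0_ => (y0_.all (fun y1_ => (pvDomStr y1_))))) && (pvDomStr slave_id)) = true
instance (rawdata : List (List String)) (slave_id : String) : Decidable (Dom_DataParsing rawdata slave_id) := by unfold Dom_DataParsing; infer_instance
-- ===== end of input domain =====

-- B replaces A's two phases (parse every line into a nested `results` list of rows, then
-- re-scan it comparing row[1]) with one accumulating pass that selects words by a string
-- PREFIX test (w == slave_id or w.startswith(slave_id + ',')) and splits only the selected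
-- words into rows; an id containing ',' can never match a split field, so B returns []
-- for it at once: simpler, no intermediate structure, no per-row indexing.

-- ===== PORT A =====
-- literal transliteration of A; words[0]/first[0]/t[1] are total here because split
-- never returns an empty list and every produced row has ≥ 2 elements.
def DataParsing (rawdata : List (List String)) (slave_id : String) : List (List String) :=
  let results := rawdata.foldl (init := ([] : List (List (List String)))) (fun results x =>
    x.foldl (init := results) (fun results line =>
      let words := (PySem.Str.split? line "|").getD []
      let first := (PySem.Str.split? (words.headD "") ",").getD []
      let date := first.headD ""
      let words := words.set 0 (PySem.Str.replace (words.headD "") (date ++ ",") "")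
      let result := words.foldl (init := ([] : List (List String))) (fun result i =>
        result ++ [date :: (PySem.Str.split? i ",").getD []])
      results ++ [result]))
  results.foldl (init := ([] : List (List String))) (fun data_file y =>
    y.foldl (init := data_file) (fun data_file t =>
      if PySem.List.pyGet? t 1 = some slave_id then data_file ++ [t] else data_file))

-- ===== PORT B =====
-- literal transliteration of Source B: early [] for a comma-bearing id, then one
-- accumulating pass with the prefix-test filter.
def DataParsing_alt (rawdata : List (List String)) (slave_id : String) : List (List String) :=
  if PySem.Str.isIn "," slave_id then []
  else
    let key := slave_id ++ ","
    rawdata.foldl (init := ([] : List (List String))) (fun data_file x =>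
      x.foldl (init := data_file) (fun data_file line =>
        let words := (PySem.Str.split? line "|").getD []
        let date := ((PySem.Str.split? (words.headD "") ",").getD []).headD ""
        let words := words.set 0 (PySem.Str.replace (words.headD "") (date ++ ",") "")
        words.foldl (init := data_file) (fun data_file w =>
          if w == slave_id || PySem.Str.startswith w key then
            data_file ++ [date :: (PySem.Str.split? w ",").getD []]
          else data_file)))

-- ===== PRECONDITION & SPEC =====
def Spec_DataParsing (rawdata : List (List String)) (slave_id : String) (out : List (List String)) : Prop := out = DataParsing_alt rawdata slave_id
instance (rawdata : List (List String)) (slave_id : String) (out : List (List String)) : Decidable (Spec_DataParsing rawdata slave_id out) := by unfold Spec_DataParsing; infer_instance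

-- ===== CLAIM (what is proved, stated in full; the proofs are below) =====
def Claim_equal_DataParsing : Prop := ∀ (rawdata : List (List String)) (slave_id : String), Dom_DataParsing rawdata slave_id → Spec_DataParsing rawdata slave_id (DataParsing rawdata slave_id)

-- ===== LEMMAS AND PROOFS =====

-- splitOn.go never returns the empty list
theorem pv_go_ne_nil (sep : List Char) (fuel : Nat) (l cur : List Char) (acc : List (List Char)) :
    PySem.Chars.splitOn.go sep fuel l cur acc ≠ [] := by
  induction fuel generalizing l cur acc with
  | zero => simp [PySem.Chars.splitOn.go]
  | succ n ih =>
    cases l with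
    | nil => simp [PySem.Chars.splitOn.go]
    | cons c rest =>
      rw [PySem.Chars.splitOn.go]
      split
      · exact ih _ _ _
      · exact ih _ _ _

theorem pv_split_ne_nil (s sep : String) (h : sep.toList ≠ []) :
    (PySem.Str.split? s sep).getD [] ≠ [] := by
  simp [PySem.Str.split?, PySem.Chars.split?, List.isEmpty_iff, h, PySem.Chars.splitOn]
  intro hx
  exact pv_go_ne_nil _ _ _ _ _ (by simpa using hx)

-- the accumulator of splitOn.go only prepends finished pieces
theorem pv_go_acc (sep : List Char) (fuel : Nat) (l cur : List Char) (acc : List (List Char)) :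
    PySem.Chars.splitOn.go sep fuel l cur acc
      = acc.reverse ++ PySem.Chars.splitOn.go sep fuel l cur [] := by
  induction fuel generalizing l cur acc with
  | zero => simp [PySem.Chars.splitOn.go]
  | succ n ih =>
    cases l with
    | nil => simp [PySem.Chars.splitOn.go]
    | cons c rest =>
      rw [PySem.Chars.splitOn.go]
      conv_rhs => rw [PySem.Chars.splitOn.go]
      split
      · rw [ih _ _ (cur.reverse :: acc), ih _ _ [cur.reverse]]
        simp
      · exact ih _ _ _

-- with a one-character separator, the first piece is the longest c-free prefix
theorem pv_go_head (c : Char) (fuel : Nat) (l cur : List Char) (h : l.length < fuel) :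
    ∃ rest, PySem.Chars.splitOn.go [c] fuel l cur []
      = (cur.reverse ++ l.takeWhile (fun x => !(x == c))) :: rest := by
  induction fuel generalizing l cur with
  | zero => omega
  | succ n ih =>
    cases l with
    | nil => exact ⟨[], by simp [PySem.Chars.splitOn.go]⟩
    | cons c' rest =>
      rw [PySem.Chars.splitOn.go]
      by_cases hc : c' = c
      · have hpre : [c].isPrefixOf (c' :: rest) = true := by simp [List.isPrefixOf, hc]
        rw [if_pos hpre, pv_go_acc]
        refine ⟨PySem.Chars.splitOn.go [c] n (List.drop 1 (c' :: rest)) [] [], ?_⟩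
        simp [hc]
      · have hpre : ¬ ([c].isPrefixOf (c' :: rest) = true) := by
          simp [List.isPrefixOf]
          exact fun h' => absurd h'.symm hc
        rw [if_neg hpre]
        obtain ⟨r, hr⟩ := ih rest (c' :: cur) (by simp at h ⊢; omega)
        exact ⟨r, by simp [hr, hc]⟩

theorem pv_splitOn_head (c : Char) (cs : List Char) :
    ∃ rest, PySem.Chars.splitOn cs [c] = (cs.takeWhile (fun x => !(x == c))) :: rest := by
  obtain ⟨r, hr⟩ := pv_go_head c (cs.length + 1) cs [] (by omega)
  exact ⟨r, by simpa [PySem.Chars.splitOn] using hr⟩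

-- takeWhile over a clean prefix followed by the stop character
theorem pv_takeWhile_append_stop (p : Char → Bool) (sl t : List Char) (c : Char)
    (h : ∀ x ∈ sl, p x) (hc : p c = false) : (sl ++ c :: t).takeWhile p = sl := by
  induction sl with
  | nil => simp [hc]
  | cons a s ih =>
    have := h a (by simp)
    simp [this, ih (fun x hx => h x (by simp [hx]))]

-- the longest c-free prefix equals sl  ⇔  c ∉ sl and cs is sl or starts with sl ++ [c]
theorem pv_takeWhile_eq_iff (c : Char) (cs sl : List Char) :
    cs.takeWhile (fun x => !(x == c)) = sl ↔ (c ∉ sl ∧ (cs = sl ∨ sl ++ [c] <+: cs)) := by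
  constructor
  · intro h
    refine ⟨fun hmem => ?_, ?_⟩
    · have := List.mem_takeWhile_imp (h ▸ hmem)
      simp at this
    · rcases hd : cs.dropWhile (fun x => !(x == c)) with _ | ⟨d, ds⟩
      · left
        have := List.takeWhile_append_dropWhile (p := fun x => !(x == c)) (l := cs)
        rw [h, hd] at this; simpa using this.symm
      · right
        have hne : cs.dropWhile (fun x => !(x == c)) ≠ [] := by simp [hd]
        have hdc := List.head_dropWhile_not (p := fun x => !(x == c)) hne
        simp [hd] at hdc
        have := List.takeWhile_append_dropWhile (p := fun x => !(x == c)) (l := cs)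
        rw [h, hd, hdc] at this
        exact ⟨ds, by simpa using this⟩
  · rintro ⟨hmem, hcs | ⟨t, ht⟩⟩
    · subst hcs
      exact List.takeWhile_eq_self_iff.mpr (fun x hx => by
        simp; exact fun he => hmem (he ▸ hx))
    · subst ht
      rw [List.append_assoc, List.singleton_append]
      exact pv_takeWhile_append_stop _ sl t c
        (fun x hx => by simp; exact fun he => hmem (he ▸ hx)) (by simp)

-- the two filter conditions agree on every produced row
theorem pv_cond (date w slave : String) :
    decide (PySem.List.pyGet? (date :: (PySem.Str.split? w ",").getD []) 1 = some slave)
      = (!(PySem.Str.isIn "," slave) && (w == slave || PySem.Str.startswith w (slave ++ ","))) := by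
  obtain ⟨rest, hr⟩ := pv_splitOn_head ',' w.toList
  have hfields : (PySem.Str.split? w ",").getD []
      = String.ofList (w.toList.takeWhile (fun x => !(x == ','))) :: rest.map String.ofList := by
    simp [PySem.Str.split?, PySem.Chars.split?]
    rw [hr]
    simp
  rw [Bool.eq_iff_iff, hfields]
  simp only [PySem.List.pyGet?, PySem.List.pyIdx?]
  norm_num
  simp only [PySem.Chars.isIn_eq_false_iff, PySem.Chars.startswith_iff,
    show (",":String).toList = [','] from rfl]
  have hof : String.ofList (w.toList.takeWhile (fun x => !(x == ','))) = slave ↔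
      w.toList.takeWhile (fun x => !(x == ',')) = slave.toList := by
    constructor
    · intro h; rw [← h]; simp
    · intro h; rw [String.ext_iff]; simpa using h
  rw [hof, pv_takeWhile_eq_iff, ← List.singleton_infix_iff]
  constructor
  · rintro ⟨h1, h2⟩
    exact ⟨h1, h2.imp (fun h => String.ext_iff.mpr h) id⟩
  · rintro ⟨h1, h2⟩
    exact ⟨h1, h2.imp (fun h => congrArg String.toList h) id⟩

-- per-line pieces as A computes them (proof-side helpers)
def pvDate (line : String) : String :=
  ((PySem.Str.split? (((PySem.Str.split? line "|").getD []).headD "") ",").getD []).headD ""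

def pvWords (line : String) : List String :=
  PySem.Str.replace (((PySem.Str.split? line "|").getD []).headD "") (pvDate line ++ ",") ""
    :: ((PySem.Str.split? line "|").getD []).drop 1

def pvRows (line : String) : List (List String) :=
  (pvWords line).map (fun w => pvDate line :: (PySem.Str.split? w ",").getD [])

theorem pv_set_eq_cons {α : Type} (l : List α) (a : α) (h : l ≠ []) :
    l.set 0 a = a :: l.drop 1 := by
  cases l with
  | nil => exact absurd rfl h
  | cons b t => simp

-- phase 1 of A: the results accumulator is a flatMap of per-line results
theorem pv_phase1 (rawdata : List (List String)) (acc : List (List (List String))) :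
    rawdata.foldl (init := acc) (fun results x =>
      x.foldl (init := results) (fun results line =>
        let words := (PySem.Str.split? line "|").getD []
        let first := (PySem.Str.split? (words.headD "") ",").getD []
        let date := first.headD ""
        let words := words.set 0 (PySem.Str.replace (words.headD "") (date ++ ",") "")
        let result := words.foldl (init := ([] : List (List String))) (fun result i =>
          result ++ [date :: (PySem.Str.split? i ",").getD []])
        results ++ [result]))
    = acc ++ rawdata.flatMap (fun x => x.map pvRows) := by
  have hstep : (fun (results : List (List (List String))) (line : String) =>
      let words := (PySem.Str.split? line "|").getD []
      let first := (PySem.Str.split? (words.headD "") ",").getD []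
      let date := first.headD ""
      let words := words.set 0 (PySem.Str.replace (words.headD "") (date ++ ",") "")
      let result := words.foldl (init := ([] : List (List String))) (fun result i =>
        result ++ [date :: (PySem.Str.split? i ",").getD []])
      results ++ [result])
      = (fun results line => results ++ [pvRows line]) := by
    funext results line
    have hne : (PySem.Str.split? line "|").getD [] ≠ [] :=
      pv_split_ne_nil line "|" (by decide)
    simp only [pvRows, pvWords, pvDate, pv_set_eq_cons _ _ hne,
      PySem.List.foldl_append_singleton_eq_map, List.nil_append]
  induction rawdata generalizing acc with
  | nil => simp
  | cons x xs ih =>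
    simp only [List.foldl_cons]
    rw [ih]
    rw [hstep, PySem.List.foldl_append_singleton_eq_map, List.flatMap_cons, List.append_assoc]

-- phase 2 of A: the filtering fold is a filtered flatMap
theorem pv_phase2 (slave_id : String) (results : List (List (List String))) (acc : List (List String)) :
    results.foldl (init := acc) (fun data_file y =>
      y.foldl (init := data_file) (fun data_file t =>
        if PySem.List.pyGet? t 1 = some slave_id then data_file ++ [t] else data_file))
    = acc ++ results.flatMap (fun y =>
        y.filter (fun t => decide (PySem.List.pyGet? t 1 = some slave_id))) := by
  have hfix : (fun (data_file : List (List String)) (t : List String) =>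
      if PySem.List.pyGet? t 1 = some slave_id then data_file ++ [t] else data_file)
      = (fun data_file t =>
        if decide (PySem.List.pyGet? t 1 = some slave_id) = true then data_file ++ [id t] else data_file) := by
    funext d t; by_cases h : PySem.List.pyGet? t 1 = some slave_id <;> simp [h]
  rw [hfix]
  induction results generalizing acc with
  | nil => simp
  | cons y ys ih =>
    simp only [List.foldl_cons]
    rw [PySem.List.foldl_append_if, ih, List.flatMap_cons, List.append_assoc]
    simp

-- B's fold is a flatMap filtered by the prefix condition
theorem pv_b_shape (rawdata : List (List String)) (slave_id : String) (acc : List (List String)) :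
    rawdata.foldl (init := acc) (fun data_file x =>
      x.foldl (init := data_file) (fun data_file line =>
        let words := (PySem.Str.split? line "|").getD []
        let date := ((PySem.Str.split? (words.headD "") ",").getD []).headD ""
        let words := words.set 0 (PySem.Str.replace (words.headD "") (date ++ ",") "")
        words.foldl (init := data_file) (fun data_file w =>
          if w == slave_id || PySem.Str.startswith w (slave_id ++ ",") then
            data_file ++ [date :: (PySem.Str.split? w ",").getD []]
          else data_file)))
    = acc ++ rawdata.flatMap (fun x => x.flatMap (fun line =>
        List.map (fun w => pvDate line :: (PySem.Str.split? w ",").getD [])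
          ((pvWords line).filter (fun w => w == slave_id || PySem.Str.startswith w (slave_id ++ ","))))) := by
  have hline : ∀ (acc : List (List String)) (x : List String),
      x.foldl (init := acc) (fun data_file line =>
        let words := (PySem.Str.split? line "|").getD []
        let date := ((PySem.Str.split? (words.headD "") ",").getD []).headD ""
        let words := words.set 0 (PySem.Str.replace (words.headD "") (date ++ ",") "")
        words.foldl (init := data_file) (fun data_file w =>
          if w == slave_id || PySem.Str.startswith w (slave_id ++ ",") then
            data_file ++ [date :: (PySem.Str.split? w ",").getD []]
          else data_file))
      = acc ++ x.flatMap (fun line =>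
        List.map (fun w => pvDate line :: (PySem.Str.split? w ",").getD [])
          ((pvWords line).filter (fun w => w == slave_id || PySem.Str.startswith w (slave_id ++ ",")))) := by
    intro acc x
    induction x generalizing acc with
    | nil => simp
    | cons line ls ihl =>
      simp only [List.foldl_cons]
      have hne : (PySem.Str.split? line "|").getD [] ≠ [] :=
        pv_split_ne_nil line "|" (by decide)
      rw [show ((PySem.Str.split? (((PySem.Str.split? line "|").getD []).headD "") ",").getD []).headD ""
            = pvDate line from rfl,
        pv_set_eq_cons _ _ hne,
        PySem.List.foldl_append_if
          (fun w => w == slave_id || PySem.Str.startswith w (slave_id ++ ","))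
          (fun w => pvDate line :: (PySem.Str.split? w ",").getD []),
        ihl, List.flatMap_cons, List.append_assoc]
      rfl
  induction rawdata generalizing acc with
  | nil => simp
  | cons x xs ih =>
    simp only [List.foldl_cons]
    rw [hline, ih, List.flatMap_cons, List.append_assoc]

-- ===== VERDICT (by name: the statement is the Claim_ definition above) =====
theorem DataParsing_spec : Claim_equal_DataParsing := by
  intro rawdata slave_id _
  show DataParsing rawdata slave_id = DataParsing_alt rawdata slave_id
  simp only [DataParsing, DataParsing_alt]
  rw [pv_phase1, pv_phase2, List.nil_append, List.nil_append]
  have hA : (rawdata.flatMap (fun x => x.map pvRows)).flatMap (fun y =>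
        y.filter (fun t => decide (PySem.List.pyGet? t 1 = some slave_id)))
      = rawdata.flatMap (fun x => x.flatMap (fun line =>
          List.map (fun w => pvDate line :: (PySem.Str.split? w ",").getD [])
            ((pvWords line).filter (fun w =>
              !(PySem.Str.isIn "," slave_id) && (w == slave_id || PySem.Str.startswith w (slave_id ++ ",")))))) := by
    rw [List.flatMap_assoc]
    refine List.flatMap_congr (fun x _ => ?_)
    rw [List.flatMap_map]
    refine List.flatMap_congr (fun line _ => ?_)
    rw [pvRows, List.filter_map]
    refine congrArg _ (List.filter_congr (fun w _ => ?_))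
    exact pv_cond (pvDate line) w slave_id
  rw [hA]
  by_cases h : PySem.Str.isIn "," slave_id
  · rw [if_pos h]
    simp only [h, Bool.not_true, Bool.false_and]
    simp
  · rw [if_neg h]
    rw [pv_b_shape, List.nil_append]
    simp only [Bool.not_eq_true] at h
    simp only [h, Bool.not_false, Bool.true_and]
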